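-- pv_equiv track=rewrite | github.com/FabriceCh/advent-of-code | old/2021/day19-2021.py | _get_rel_distances
-- ===== SOURCE A (Python) =====
-- def _get_rel_distances(positions):
--     distances = {i: [] for i in range(len(positions))}
--     for i, pos in enumerate(positions):
--         for j, pos2 in enumerate(positions):
--             if j != i:
--                 dist = (pos[0]-pos2[0])**2 + (pos[1]-pos2[1])**2 + (pos[2]-pos2[2])**2
--                 distances[i].append(dist)
--         distances[i].sort()
--     return distances
-- ===== SOURCE B (Python) =====
-- def _insorted(lst, x):
--     k = 0
--     while k < len(lst) and lst[k] <= x: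
--         k += 1
--     return lst[:k] + [x] + lst[k:]
--
--
-- def _rows(pts):
--     if not pts:
--         return []
--     head = pts[0]
--     rest = pts[1:]
--     sub = _rows(rest)
--     head_row = []
--     new_rows = []
--     for q, row in zip(rest, sub):
--         d = (head[0]-q[0])**2 + (head[1]-q[1])**2 + (head[2]-q[2])**2
--         head_row = _insorted(head_row, d)
--         new_rows.append(_insorted(row, d))
--     return [head_row] + new_rows
--
--
-- def _get_rel_distances(positions):
--     rows = _rows(positions)
--     return {i: row for i, row in enumerate(rows)}
-- ===== Notes on version B (the rewrite author's own statement) =====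
-- stated objective: alternative
-- what changed: Replaces A's index-based double loop with per-row terminal sorts by a structural recursion on the point list: the tail's rows are built recursively, each head-to-tail distance is computed once and merged into both endpoints' rows by sorted insertion, so rows are kept sorted as an invariant and no sort pass exists.
import Mathlib
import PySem

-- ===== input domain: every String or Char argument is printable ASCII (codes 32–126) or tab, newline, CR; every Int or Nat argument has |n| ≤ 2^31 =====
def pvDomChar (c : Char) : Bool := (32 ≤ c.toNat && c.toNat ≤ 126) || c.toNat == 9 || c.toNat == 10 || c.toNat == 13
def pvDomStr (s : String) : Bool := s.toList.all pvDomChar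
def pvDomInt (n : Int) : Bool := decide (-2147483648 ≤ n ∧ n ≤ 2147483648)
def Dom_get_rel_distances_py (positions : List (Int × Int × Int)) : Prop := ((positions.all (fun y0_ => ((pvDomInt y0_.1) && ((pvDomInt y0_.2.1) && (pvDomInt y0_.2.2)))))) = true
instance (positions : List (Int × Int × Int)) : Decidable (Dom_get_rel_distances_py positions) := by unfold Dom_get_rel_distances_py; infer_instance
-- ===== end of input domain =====

-- B rebuilds the per-point sorted distance lists by structural recursion on the point list,
-- merging each head-to-tail distance once into both endpoints' rows by sorted insertion
-- (alternative decomposition; no final sort pass; not claimed faster).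

-- squared distance, the same arithmetic expression both Pythons write inline
def pvSqDist (p q : Int × Int × Int) : Int :=
  (p.1 - q.1) ^ 2 + (p.2.1 - q.2.1) ^ 2 + (p.2.2 - q.2.2) ^ 2

-- ===== PORT A =====
def get_rel_distances_py (positions : List (Int × Int × Int)) : List (Int × List Int) :=
  let d0 : PySem.Dict Int (List Int) :=
    (PySem.List.pyRange 0 (positions.length : Int)).foldl (fun d i => d.insert i []) PySem.Dict.empty
  let d := (PySem.List.enumerate positions).foldl
      (fun d ip =>
        let d := (PySem.List.enumerate positions).foldl
          (fun d jq =>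
            if jq.1 ≠ ip.1 then d.modify ip.1 [] (fun l => l ++ [pvSqDist ip.2 jq.2]) else d) d
        d.modify ip.1 [] (fun l => PySem.List.sorted l (fun x => x) false)) d0
  d.items

-- ===== PORT B =====
-- _insorted: the while-loop insertion into an ascending list, as structural recursion
def pvInsorted (lst : List Int) (x : Int) : List Int :=
  match lst with
  | [] => [x]
  | a :: t => if a ≤ x then a :: pvInsorted t x else x :: a :: t

-- _rows: recursive construction; each pair's distance computed once, merged into both rows
def pvRowsB : List (Int × Int × Int) → List (List Int)
  | [] => []
  | head :: rest =>
    let sub := pvRowsB rest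
    let step := (rest.zip sub).foldl
      (fun (acc : List Int × List (List Int)) qr =>
        (pvInsorted acc.1 (pvSqDist head qr.1), acc.2 ++ [pvInsorted qr.2 (pvSqDist head qr.1)]))
      ([], [])
    step.1 :: step.2

def get_rel_distances_py_alt (positions : List (Int × Int × Int)) : List (Int × List Int) :=
  ((PySem.List.enumerate (pvRowsB positions)).foldl
    (fun d ir => d.insert ir.1 ir.2) PySem.Dict.empty).items

-- ===== PRECONDITION & SPEC =====
def Spec_get_rel_distances_py (positions : List (Int × Int × Int)) (out : List (Int × List Int)) : Prop := out = get_rel_distances_py_alt positions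
instance (positions : List (Int × Int × Int)) (out : List (Int × List Int)) : Decidable (Spec_get_rel_distances_py positions out) := by unfold Spec_get_rel_distances_py; infer_instance

-- ===== CLAIM (what is proved, stated in full; the proofs are below) =====
def Claim_equal_get_rel_distances_py : Prop := ∀ (positions : List (Int × Int × Int)), Dom_get_rel_distances_py positions → Spec_get_rel_distances_py positions (get_rel_distances_py positions)

-- ===== LEMMAS AND PROOFS =====

theorem pvSqDist_comm (p q : Int × Int × Int) : pvSqDist p q = pvSqDist q p := by
  unfold pvSqDist; ring

-- f positions i j = the squared distance between positions[i] and positions[j]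
def pvF (positions : List (Int × Int × Int)) (i j : Int) : Int :=
  pvSqDist (PySem.List.pyGetD positions i (0, 0, 0)) (PySem.List.pyGetD positions j (0, 0, 0))

-- the common normal form of both programs' value at key k
def pvVal (positions : List (Int × Int × Int)) (k : Int) : List Int :=
  PySem.List.sorted
    ((PySem.List.pyRange 0 k).map (fun j => pvF positions k j) ++
     (PySem.List.pyRange (k + 1) (positions.length : Int)).map (fun j => pvF positions k j))
    (fun x => x) false

theorem pvGetD_fold_insert_nil (l : List Int) (d : PySem.Dict Int (List Int)) (k : Int)
    (h : d.getD k [] = []) :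
    ((l.foldl (fun d i => d.insert i ([] : List Int)) d)).getD k [] = [] := by
  induction l generalizing d with
  | nil => exact h
  | cons a t ih =>
      simp only [List.foldl_cons]
      exact ih _ (by rw [PySem.Dict.getD_insert]; split_ifs <;> simp [h])

theorem pvKeys_modify_mem (d : PySem.Dict Int (List Int)) (k : Int) (f : List Int → List Int)
    (h : k ∈ d.keys) : (d.modify k [] f).keys = d.keys := by
  rw [PySem.Dict.keys_modify]
  exact PySem.Dict.keys_insert_of_contains _ _ ((PySem.Dict.contains_iff_mem_keys _ _).mpr h)

theorem pvKeys_foldl_preserve {α : Type} (l : List α)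
    (F : PySem.Dict Int (List Int) → α → PySem.Dict Int (List Int)) (K : List Int)
    (h : ∀ d a, a ∈ l → d.keys = K → (F d a).keys = K) :
    ∀ d : PySem.Dict Int (List Int), d.keys = K → (l.foldl F d).keys = K := by
  induction l with
  | nil => intro d hd; exact hd
  | cons a t ih =>
      intro d hd
      simp only [List.foldl_cons]
      exact ih (fun d a ha => h d a (List.mem_cons_of_mem _ ha)) _ (h d a (List.mem_cons_self) hd)

theorem pvA_inner (L : List (Int × (Int × Int × Int))) (i : Int) (p : Int × Int × Int) (k : Int) :
    ∀ d : PySem.Dict Int (List Int),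
    ((L.foldl (fun d jq => if jq.1 ≠ i then d.modify i [] (fun l => l ++ [pvSqDist p jq.2]) else d) d)).getD k []
    = if k = i then d.getD i [] ++ (L.filter (fun jq => jq.1 != i)).map (fun jq => pvSqDist p jq.2)
      else d.getD k [] := by
  induction L with
  | nil => intro d; by_cases hk : k = i <;> simp [hk]
  | cons hd tl ih =>
      intro d
      rw [List.foldl_cons]
      by_cases hj : hd.1 ≠ i
      · rw [if_pos hj, ih]
        by_cases hk : k = i
        · subst hk
          rw [if_pos rfl, if_pos rfl, PySem.Dict.getD_modify, if_pos rfl, List.filter_cons]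
          have hb : (hd.1 != k) = true := by simpa using hj
          rw [hb]
          simp
        · rw [if_neg hk, if_neg hk, PySem.Dict.getD_modify, if_neg hk]
      · rw [if_neg hj, ih]
        by_cases hk : k = i
        · rw [if_pos hk, if_pos hk, List.filter_cons]
          have hb : (hd.1 != i) = false := by simpa using hj
          rw [hb]
          simp
        · rw [if_neg hk, if_neg hk]

theorem pvA_step (L : List (Int × (Int × Int × Int))) (i : Int) (p : Int × Int × Int)
    (d : PySem.Dict Int (List Int)) (k : Int) :
    (((L.foldl (fun d jq => if jq.1 ≠ i then d.modify i [] (fun l => l ++ [pvSqDist p jq.2]) else d) d)).modify i []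
        (fun l => PySem.List.sorted l (fun x => x) false)).getD k []
    = if k = i then
        PySem.List.sorted (d.getD i [] ++ (L.filter (fun jq => jq.1 != i)).map (fun jq => pvSqDist p jq.2)) (fun x => x) false
      else d.getD k [] := by
  rw [PySem.Dict.getD_modify]
  by_cases hk : k = i
  · rw [if_pos hk, if_pos hk, pvA_inner, if_pos rfl]
  · rw [if_neg hk, if_neg hk, pvA_inner, if_neg hk]

theorem pvA_outer (L : List (Int × (Int × Int × Int))) (xs : List (Int × Int × Int)) :
    ∀ (s : Int) (d : PySem.Dict Int (List Int)) (k : Int),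
    ((PySem.List.enumerate xs s).foldl
        (fun d ip =>
          ((L.foldl (fun d jq => if jq.1 ≠ ip.1 then d.modify ip.1 [] (fun l => l ++ [pvSqDist ip.2 jq.2]) else d) d)).modify ip.1 []
            (fun l => PySem.List.sorted l (fun x => x) false)) d).getD k []
    = if s ≤ k ∧ k < s + (xs.length : Int) then
        PySem.List.sorted
          (d.getD k [] ++ (L.filter (fun jq => jq.1 != k)).map
            (fun jq => pvSqDist (PySem.List.pyGetD xs (k - s) (0, 0, 0)) jq.2)) (fun x => x) false
      else d.getD k [] := by
  induction xs with
  | nil =>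
      intro s d k
      rw [if_neg (by simp only [List.length_nil, Nat.cast_zero]; omega)]
      simp [PySem.List.enumerate]
  | cons x xs ih =>
      intro s d k
      rw [PySem.List.enumerate_cons, List.foldl_cons, ih, pvA_step]
      dsimp only
      by_cases hk : k = s
      · subst hk
        rw [if_neg (by omega), if_pos rfl, if_pos (by simp only [List.length_cons]; push_cast; omega)]
        rw [sub_self, PySem.List.pyGetD_of_nonneg _ _ le_rfl]
        simp
      · by_cases hin : s + 1 ≤ k ∧ k < s + 1 + (xs.length : Int)
        · rw [if_pos hin, if_neg hk, if_pos (by simp only [List.length_cons]; push_cast; omega)]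
          have h1 : PySem.List.pyGetD (x :: xs) (k - (s + 1) + 1) (0, 0, 0) = PySem.List.pyGetD xs (k - (s + 1)) (0, 0, 0) := by
            rw [PySem.List.pyGetD_of_nonneg _ _ (by omega), PySem.List.pyGetD_of_nonneg _ _ (by omega)]
            have h2 : (k - (s + 1) + 1).toNat = (k - (s + 1)).toNat + 1 := by omega
            rw [h2]
            rfl
          have h3 : k - s = k - (s + 1) + 1 := by omega
          rw [h3, h1]
        · rw [if_neg hin, if_neg hk, if_neg (by simp only [List.length_cons]; push_cast; omega)]

-- keys of the initial dict comprehension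
theorem pvKeys_d0 (n : Int) :
    (((PySem.List.pyRange 0 n).foldl (fun d i => d.insert i ([] : List Int)) PySem.Dict.empty)).keys
    = PySem.List.pyRange 0 n := by
  rw [PySem.Dict.keys_foldl_insert _ (fun _ _ => ([] : List Int))]
  rw [PySem.Dict.keys_empty]
  exact PySem.Set.ofList_eq_self_of_nodup _ (PySem.List.nodup_pyRange_one _ _)

-- A's final dict in normal form
theorem pvA_char (positions : List (Int × Int × Int)) :
    get_rel_distances_py positions
    = (PySem.List.pyRange 0 (positions.length : Int)).map (fun k => (k, pvVal positions k)) := by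
  unfold get_rel_distances_py
  have hK0 := pvKeys_d0 (positions.length : Int)
  have hkeys : (((PySem.List.enumerate positions).foldl
      (fun d ip =>
        ((PySem.List.enumerate positions).foldl
          (fun d jq => if jq.1 ≠ ip.1 then d.modify ip.1 [] (fun l => l ++ [pvSqDist ip.2 jq.2]) else d) d).modify ip.1 []
          (fun l => PySem.List.sorted l (fun x => x) false))
      ((PySem.List.pyRange 0 (positions.length : Int)).foldl (fun d i => d.insert i ([] : List Int)) PySem.Dict.empty))).keys
      = PySem.List.pyRange 0 (positions.length : Int) := by
    apply pvKeys_foldl_preserve _ _ _ _ _ hK0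
    intro d ip hip hd
    have hmem : ip.1 ∈ PySem.List.pyRange 0 (positions.length : Int) := by
      rw [PySem.List.mem_pyRange_one]
      rcases (PySem.List.mem_enumerate_iff _ _ _).mp hip with ⟨m, hm, rfl⟩
      constructor <;> omega
    rw [pvKeys_modify_mem _ _ _ (by
      rw [pvKeys_foldl_preserve _ _ (PySem.List.pyRange 0 (positions.length : Int)) ?_ d hd]
      · exact hmem
      · intro d' jq _ hd'
        split
        · rw [pvKeys_modify_mem _ _ _ (hd' ▸ hmem)]; exact hd'
        · exact hd')]
    exact pvKeys_foldl_preserve _ _ _ (by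
      intro d' jq _ hd'
      split
      · rw [pvKeys_modify_mem _ _ _ (hd' ▸ hmem)]; exact hd'
      · exact hd') d hd
  rw [PySem.Dict.items_eq_map_keys _ (by rw [hkeys]; exact PySem.List.nodup_pyRange_one _ _) ([] : List Int), hkeys]
  apply List.map_congr_left
  intro k hk
  rw [PySem.List.mem_pyRange_one] at hk
  rw [pvA_outer]
  rw [if_pos (by constructor <;> omega)]
  rw [pvGetD_fold_insert_nil _ _ _ (PySem.Dict.getD_empty _ _), List.nil_append]
  congr 1
  unfold pvVal
  congr 1
  rw [PySem.List.enumerate_eq_map_pyRange positions (0, 0, 0)]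
  rw [List.filter_map, List.map_map]
  have hsplit : PySem.List.pyRange 0 (PySem.List.len positions)
      = PySem.List.pyRange 0 k ++ (k :: PySem.List.pyRange (k + 1) (positions.length : Int)) := by
    have h1 : PySem.List.len positions = (positions.length : Int) := rfl
    rw [h1, PySem.List.pyRange_one_append 0 k (positions.length : Int) (by omega) (by omega),
      PySem.List.pyRange_one_cons (a := k) (b := (positions.length : Int)) (by omega)]
  rw [hsplit, List.filter_append, List.filter_cons, List.map_append]
  have hl : List.filter ((fun jq => jq.1 != k) ∘ fun j => (j, PySem.List.pyGetD positions j (0, 0, 0)))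
      (PySem.List.pyRange 0 k) = PySem.List.pyRange 0 k := by
    apply List.filter_eq_self.mpr
    intro a ha
    rw [PySem.List.mem_pyRange_one] at ha
    simp; omega
  have hr : List.filter ((fun jq => jq.1 != k) ∘ fun j => (j, PySem.List.pyGetD positions j (0, 0, 0)))
      (PySem.List.pyRange (k + 1) (positions.length : Int)) = PySem.List.pyRange (k + 1) (positions.length : Int) := by
    apply List.filter_eq_self.mpr
    intro a ha
    rw [PySem.List.mem_pyRange_one] at ha
    simp; omega
  rw [hl, hr]
  have hself : ((fun jq => jq.1 != k) ∘ fun j => (j, PySem.List.pyGetD positions j (0, 0, 0))) k = false := by simp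
  rw [hself]
  have hks : k - 0 = k := by omega
  rw [hks]
  rfl

-- ===== B-side lemmas =====

theorem pvInsorted_perm (l : List Int) (x : Int) : (pvInsorted l x).Perm (x :: l) := by
  induction l with
  | nil => simp [pvInsorted]
  | cons a t ih =>
      unfold pvInsorted
      split
      · exact (ih.cons a).trans (List.Perm.swap x a t)
      · exact List.Perm.refl _

theorem pvInsorted_sorted (l : List Int) (x : Int) (h : l.Pairwise (· ≤ ·)) :
    (pvInsorted l x).Pairwise (· ≤ ·) := by
  induction l with
  | nil => simp [pvInsorted]
  | cons a t ih =>
      rw [List.pairwise_cons] at h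
      unfold pvInsorted
      split
      · rename_i hax
        rw [List.pairwise_cons]
        refine ⟨fun b hb => ?_, ih h.2⟩
        rcases List.mem_cons.mp ((pvInsorted_perm t x).mem_iff.mp hb) with rfl | hb
        · exact hax
        · exact h.1 b hb
      · rename_i hax
        rw [List.pairwise_cons]
        exact ⟨fun b hb => by
          rcases List.mem_cons.mp hb with rfl | hb
          · omega
          · have := h.1 b hb; omega,
          List.pairwise_cons.mpr h⟩

theorem pvFoldl_insorted (ds : List Int) :
    ∀ init : List Int, init.Pairwise (· ≤ ·) →
    (ds.foldl pvInsorted init).Pairwise (· ≤ ·) ∧ (ds.foldl pvInsorted init).Perm (init ++ ds) := by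
  induction ds with
  | nil => intro init h; exact ⟨h, by simp⟩
  | cons d t ih =>
      intro init h
      rw [List.foldl_cons]
      rcases ih (pvInsorted init d) (pvInsorted_sorted _ _ h) with ⟨hs, hp⟩
      exact ⟨hs, hp.trans (((pvInsorted_perm init d).append_right t).trans List.perm_middle.symm)⟩

-- the pair fold of pvRowsB splits into an insort fold and a map
theorem pvFold_pair (l : List ((Int × Int × Int) × List Int)) (p : Int × Int × Int) :
    ∀ (i1 : List Int) (i2 : List (List Int)),
    l.foldl (fun (acc : List Int × List (List Int)) qr =>
        (pvInsorted acc.1 (pvSqDist p qr.1), acc.2 ++ [pvInsorted qr.2 (pvSqDist p qr.1)])) (i1, i2)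
    = (l.foldl (fun a qr => pvInsorted a (pvSqDist p qr.1)) i1,
       i2 ++ l.map (fun qr => pvInsorted qr.2 (pvSqDist p qr.1))) := by
  induction l with
  | nil => intro i1 i2; simp
  | cons q t ih =>
      intro i1 i2
      rw [List.foldl_cons, List.foldl_cons, ih]
      simp

def pvOthers (pts : List (Int × Int × Int)) (k : Nat) : List (Int × Int × Int) :=
  pts.take k ++ pts.drop (k + 1)

def pvDistsTo (pts : List (Int × Int × Int)) (k : Nat) : List Int :=
  (pvOthers pts k).map (fun q => pvSqDist (pts.getD k (0, 0, 0)) q)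

theorem pvRowsB_length (pts : List (Int × Int × Int)) : (pvRowsB pts).length = pts.length := by
  induction pts with
  | nil => rfl
  | cons p rest ih =>
      show (pvRowsB (p :: rest)).length = rest.length + 1
      simp only [pvRowsB]
      rw [pvFold_pair]
      simp [List.length_zip, ih]

theorem pvRowsB_spec (pts : List (Int × Int × Int)) :
    ∀ (k : Nat) (h : k < pts.length),
    ((pvRowsB pts).getD k []).Pairwise (· ≤ ·) ∧ ((pvRowsB pts).getD k []).Perm (pvDistsTo pts k) := by
  induction pts with
  | nil => intro k h; exact absurd h (by simp)
  | cons p rest ih =>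
      intro k hk
      have hlen : (pvRowsB rest).length = rest.length := pvRowsB_length rest
      have hrows : pvRowsB (p :: rest)
          = ((rest.zip (pvRowsB rest)).foldl (fun a qr => pvInsorted a (pvSqDist p qr.1)) [])
            :: (rest.zip (pvRowsB rest)).map (fun qr => pvInsorted qr.2 (pvSqDist p qr.1)) := by
        simp only [pvRowsB]
        rw [pvFold_pair]
        rfl
      cases k with
      | zero =>
          rw [hrows]
          simp only [List.getD_cons_zero]
          have hmap : (rest.zip (pvRowsB rest)).foldl (fun a qr => pvInsorted a (pvSqDist p qr.1)) []
              = ((rest.zip (pvRowsB rest)).map (fun qr => pvSqDist p qr.1)).foldl pvInsorted [] := by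
            rw [List.foldl_map]
          have hfst : (rest.zip (pvRowsB rest)).map (fun qr => pvSqDist p qr.1)
              = rest.map (fun q => pvSqDist p q) := by
            have : (rest.zip (pvRowsB rest)).map (fun qr => pvSqDist p qr.1)
                = ((rest.zip (pvRowsB rest)).map Prod.fst).map (fun q => pvSqDist p q) := by
              rw [List.map_map]; rfl
            rw [this, List.map_fst_zip (by omega)]
          rcases pvFoldl_insorted (rest.map (fun q => pvSqDist p q)) [] (by simp) with ⟨hs, hp⟩
          rw [hmap, hfst]
          refine ⟨hs, hp.trans ?_⟩
          simp only [List.nil_append]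
          unfold pvDistsTo pvOthers
          simp
      | succ m =>
          rw [hrows]
          simp only [List.getD_cons_succ]
          have hm : m < rest.length := by simpa using hk
          have hmz : m < (rest.zip (pvRowsB rest)).length := by
            rw [List.length_zip]; omega
          have hget : ((rest.zip (pvRowsB rest)).map (fun qr => pvInsorted qr.2 (pvSqDist p qr.1))).getD m []
              = pvInsorted ((pvRowsB rest).getD m []) (pvSqDist p (rest.getD m (0, 0, 0))) := by
            rw [List.getD_eq_getElem _ _ (by simpa using hmz), List.getElem_map, List.getElem_zip]
            rw [List.getD_eq_getElem _ _ (by omega), List.getD_eq_getElem _ _ hm]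
          rw [hget]
          rcases ih m hm with ⟨hs, hp⟩
          have heq : pvDistsTo (p :: rest) (m + 1)
              = pvSqDist p (rest.getD m (0, 0, 0)) :: pvDistsTo rest m := by
            unfold pvDistsTo pvOthers
            simp only [List.take_succ_cons, List.drop_succ_cons, List.getD_cons_succ, List.cons_append, List.map_cons]
            rw [pvSqDist_comm]
          rw [heq]
          exact ⟨pvInsorted_sorted _ _ hs, (pvInsorted_perm _ _).trans (hp.cons _)⟩

-- prefix of getD values over List.range is take
theorem pvMap_getD_range {α : Type} (xs : List α) (c : Nat) (d : α) (h : c ≤ xs.length) :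
    (List.range c).map (fun m => xs.getD m d) = xs.take c := by
  apply List.ext_getElem
  · simp; omega
  · intro i h1 h2
    simp only [List.getElem_map, List.getElem_range, List.getElem_take]
    rw [List.getD_eq_getElem _ _ (by simp at h1; omega)]

-- the unsorted list A sorts, rewritten over take/drop
theorem pvVal_eq_sorted_dists (positions : List (Int × Int × Int)) (k : Int)
    (h0 : 0 ≤ k) (hn : k < (positions.length : Int)) :
    pvVal positions k = PySem.List.sorted (pvDistsTo positions k.toNat) (fun x => x) false := by
  unfold pvVal pvDistsTo pvOthers
  congr 1
  have hP : PySem.List.pyGetD positions k (0, 0, 0) = positions.getD k.toNat (0, 0, 0) := by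
    rw [PySem.List.pyGetD_of_nonneg _ _ h0]
  have hleft : (PySem.List.pyRange 0 k).map (fun j => pvF positions k j)
      = (positions.take k.toNat).map (fun q => pvSqDist (positions.getD k.toNat (0, 0, 0)) q) := by
    rw [PySem.List.pyRange_one, List.map_map, show k - 0 = k from by omega,
      ← pvMap_getD_range positions k.toNat (0, 0, 0) (by omega), List.map_map]
    apply List.map_congr_left
    intro m hm
    rw [List.mem_range] at hm
    simp only [Function.comp_apply, zero_add]
    unfold pvF
    rw [hP, PySem.List.pyGetD_of_nonneg _ _ (by omega)]
    simp
  have hright : (PySem.List.pyRange (k + 1) (positions.length : Int)).map (fun j => pvF positions k j)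
      = (positions.drop (k.toNat + 1)).map (fun q => pvSqDist (positions.getD k.toNat (0, 0, 0)) q) := by
    have h2 : (PySem.List.pyRange (k + 1) (positions.length : Int)).map (fun j => pvF positions k j)
        = ((PySem.List.pyRange (k + 1) (positions.length : Int)).map (fun j => PySem.List.pyGetD positions j (0, 0, 0))).map
            (fun q => pvSqDist (PySem.List.pyGetD positions k (0, 0, 0)) q) := by
      rw [List.map_map]; rfl
    rw [h2, PySem.List.map_pyGetD_pyRange' positions (0, 0, 0) (a := k + 1) (by omega), hP]
    congr 2
    omega
  rw [hleft, hright, ← List.map_append]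

-- B's result in the same normal form
theorem pvB_char (positions : List (Int × Int × Int)) :
    get_rel_distances_py_alt positions
    = (PySem.List.pyRange 0 (positions.length : Int)).map (fun k => (k, pvVal positions k)) := by
  unfold get_rel_distances_py_alt
  have hfold : (List.foldl (fun (d : PySem.Dict Int (List Int)) (ir : Int × List Int) => d.insert ir.1 ir.2)
        PySem.Dict.empty (PySem.List.enumerate (pvRowsB positions))).items
      = (PySem.Dict.empty : PySem.Dict Int (List Int)).items
        ++ (PySem.List.enumerate (pvRowsB positions)).map (fun ir => (ir.1, ir.2)) :=
    PySem.Dict.items_foldl_insert_fresh (PySem.List.enumerate (pvRowsB positions))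
      (fun ir => ir.1) (fun ir => ir.2) PySem.Dict.empty
      (by intro a _; exact PySem.Dict.contains_empty _)
      (by rw [PySem.List.map_fst_enumerate]
          exact PySem.List.nodup_pyRange_one _ _)
  rw [hfold]
  simp only [PySem.Dict.empty, PySem.Dict.items, List.nil_append]
  have hitems : (PySem.List.enumerate (pvRowsB positions)).map (fun ir => (ir.1, ir.2))
      = PySem.List.enumerate (pvRowsB positions) := by
    simp
  rw [hitems]
  apply List.ext_getElem
  · rw [PySem.List.length_enumerate, pvRowsB_length, List.length_map, PySem.List.length_pyRange_one]
    omega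
  · intro i h1 h2
    rw [PySem.List.getElem_enumerate, List.getElem_map, PySem.List.getElem_pyRange_one]
    have hi : i < positions.length := by
      rw [PySem.List.length_enumerate, pvRowsB_length] at h1; exact h1
    have hiz : ((0 : Int) + (i : Int)).toNat = i := by omega
    refine Prod.ext (by simp) ?_
    have hilen : i < (pvRowsB positions).length := by rw [pvRowsB_length]; exact hi
    show (pvRowsB positions)[i]'hilen = pvVal positions (0 + (i : Int))
    rcases pvRowsB_spec positions i hi with ⟨hs, hp⟩
    have hget : (pvRowsB positions)[i]'hilen = (pvRowsB positions).getD i [] := by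
      rw [List.getD_eq_getElem _ _ hilen]
    rw [pvVal_eq_sorted_dists positions (0 + (i : Int)) (by omega) (by push_cast; omega), hiz]
    rw [hget]
    exact (PySem.List.sorted_id_eq_of_perm_of_pairwise _ _ hp hs).symm

-- ===== VERDICT (by name: the statement is the Claim_ definition above) =====
theorem get_rel_distances_py_spec : Claim_equal_get_rel_distances_py := by
  intro positions _hdom
  show get_rel_distances_py positions = get_rel_distances_py_alt positions
  rw [pvA_char, pvB_char]
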